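-- pv_equiv track=rewrite | github.com/mblsha/retrobus-explorer | gateware/reference/spade-projects/sharp-pc-e500-card-spade/experiments/experiment_catalog.py | build_asm_pushu_a_nop_popu_imr_21_chain
-- ===== SOURCE A (Python) =====
-- def build_asm_pushu_a_nop_popu_imr_21_chain(count: int) -> str:
--     lines = [
--         ".ORG 0x10100",
--         "",
--         "start:",
--         "    MV A, 0x21",
--     ]
--     for _ in range(count):
--         lines.append("    PUSHU A")
--         lines.append("    NOP")
--         lines.append("    POPU IMR")
--     lines.append("    RETF")
--     lines.append("")
--     return "\n".join(lines)
-- ===== SOURCE B (Python) =====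
-- def build_asm_pushu_a_nop_popu_imr_21_chain(count: int) -> str:
--     header = ".ORG 0x10100\n\nstart:\n    MV A, 0x21"
--     block = "\n    PUSHU A\n    NOP\n    POPU IMR"
--     return header + block * count + "\n    RETF\n"
-- ===== Notes on version B (the rewrite author's own statement) =====
-- stated objective: simpler
-- what changed: Replaces the build-a-list-of-lines loop plus '\n'.join with a single expression header + block * count + footer using Python string repetition.
import Mathlib
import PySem

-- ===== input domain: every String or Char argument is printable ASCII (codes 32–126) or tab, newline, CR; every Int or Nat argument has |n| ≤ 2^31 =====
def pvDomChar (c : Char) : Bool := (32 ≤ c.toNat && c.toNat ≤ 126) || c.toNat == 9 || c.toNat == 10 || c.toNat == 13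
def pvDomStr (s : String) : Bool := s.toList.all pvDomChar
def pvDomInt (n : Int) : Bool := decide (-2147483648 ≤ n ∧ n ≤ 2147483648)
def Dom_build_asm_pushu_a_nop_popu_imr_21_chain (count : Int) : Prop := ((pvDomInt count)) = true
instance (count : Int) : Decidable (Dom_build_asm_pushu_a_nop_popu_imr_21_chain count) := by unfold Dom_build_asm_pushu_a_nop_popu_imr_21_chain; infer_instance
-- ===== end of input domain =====

-- B replaces A's append-three-lines loop and join by one string-repetition
-- expression (header + block * count + footer); objective: simpler.

-- ===== PORT A =====
def build_asm_pushu_a_nop_popu_imr_21_chain (count : Int) : String :=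
  let lines : List String := [".ORG 0x10100", "", "start:", "    MV A, 0x21"]
  let lines := (PySem.List.pyRange 0 count 1).foldl
    (fun ls _ => ((ls ++ ["    PUSHU A"]) ++ ["    NOP"]) ++ ["    POPU IMR"]) lines
  let lines := (lines ++ ["    RETF"]) ++ [""]
  PySem.Str.join "\n" lines

-- ===== PORT B =====
-- 'header + block * count + footer'; '+' and 's * n' are ported exactly on
-- code-point lists (PySem.List.pyRepeat is Python's list/str repetition).
def build_asm_pushu_a_nop_popu_imr_21_chain_alt (count : Int) : String :=
  let header := ".ORG 0x10100\n\nstart:\n    MV A, 0x21"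
  let block := "\n    PUSHU A\n    NOP\n    POPU IMR"
  String.ofList (header.toList ++ PySem.List.pyRepeat block.toList count ++ "\n    RETF\n".toList)

-- ===== PRECONDITION & SPEC =====
def Spec_build_asm_pushu_a_nop_popu_imr_21_chain (count : Int) (out : String) : Prop := out = build_asm_pushu_a_nop_popu_imr_21_chain_alt count
instance (count : Int) (out : String) : Decidable (Spec_build_asm_pushu_a_nop_popu_imr_21_chain count out) := by unfold Spec_build_asm_pushu_a_nop_popu_imr_21_chain; infer_instance

-- ===== CLAIM (what is proved, stated in full; the proofs are below) =====
def Claim_equal_build_asm_pushu_a_nop_popu_imr_21_chain : Prop := ∀ (count : Int), Dom_build_asm_pushu_a_nop_popu_imr_21_chain count → Spec_build_asm_pushu_a_nop_popu_imr_21_chain count (build_asm_pushu_a_nop_popu_imr_21_chain count)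

-- ===== LEMMAS AND PROOFS =====

-- join over a cons with a nonempty tail
theorem pv_join_cons_ne (sep p : List Char) (rest : List (List Char)) (h : rest ≠ []) :
    PySem.Chars.join sep (p :: rest) = p ++ sep ++ PySem.Chars.join sep rest := by
  cases rest with
  | nil => exact absurd rfl h
  | cons q t => exact PySem.Chars.join_cons_cons sep p q t

-- A's loop only ever appends the same three lines: it is init ++ n copies of the block
theorem pv_fold_blocks (l : List Int) (init : List String) :
    l.foldl (fun ls _ => ((ls ++ ["    PUSHU A"]) ++ ["    NOP"]) ++ ["    POPU IMR"]) init
    = init ++ (List.replicate l.length (["    PUSHU A", "    NOP", "    POPU IMR"] : List String)).flatten := by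
  induction l generalizing init with
  | nil => simp
  | cons x t ih =>
      simp only [List.foldl_cons, List.length_cons, List.replicate_succ, List.flatten_cons, ih]
      simp

-- joining n blocks followed by the RETF tail, with the separating '\n' in front
theorem pv_join_tail (n : Nat) :
    ('\n' :: PySem.Chars.join ['\n']
      (((List.replicate n (["    PUSHU A", "    NOP", "    POPU IMR"] : List String)).flatten.map String.toList)
        ++ ["    RETF".toList, "".toList]))
    = (List.replicate n "\n    PUSHU A\n    NOP\n    POPU IMR".toList).flatten ++ "\n    RETF\n".toList := by
  induction n with
  | zero => decide
  | succ m ih =>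
      have hne : ∀ (M : List (List Char)), M ++ ["    RETF".toList, "".toList] ≠ [] := by
        intro M h; simpa using congrArg List.length h
      simp only [List.replicate_succ, List.flatten_cons, List.append_assoc,
        List.map_cons, List.cons_append, List.nil_append]
      rw [pv_join_cons_ne _ _ _ (by simp), pv_join_cons_ne _ _ _ (by simp),
          pv_join_cons_ne _ _ _ (hne _)]
      rw [show ("\n    PUSHU A\n    NOP\n    POPU IMR".toList : List Char)
            = '\n' :: ("    PUSHU A".toList ++ '\n' :: ("    NOP".toList ++ '\n' :: "    POPU IMR".toList)) from by decide] at ih ⊢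
      simp only [List.cons_append, List.append_assoc, List.nil_append] at ih ⊢
      rw [← ih]

theorem pv_equiv (count : Int) :
    build_asm_pushu_a_nop_popu_imr_21_chain count = build_asm_pushu_a_nop_popu_imr_21_chain_alt count := by
  unfold build_asm_pushu_a_nop_popu_imr_21_chain build_asm_pushu_a_nop_popu_imr_21_chain_alt
  simp only [pv_fold_blocks, PySem.List.length_pyRange_one, PySem.List.pyRepeat]
  have hn : (count - 0).toNat = count.toNat := by omega
  rw [hn, PySem.Str.join]
  congr 1
  have hne : ∀ (M : List (List Char)), M ++ ["    RETF".toList, "".toList] ≠ [] := by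
    intro M h; simpa using congrArg List.length h
  simp only [List.append_assoc, List.map_append, List.map_cons, List.map_nil,
    List.cons_append, List.nil_append]
  rw [show ("\n".toList : List Char) = ['\n'] from by decide]
  rw [pv_join_cons_ne _ _ _ (by simp), pv_join_cons_ne _ _ _ (by simp),
      pv_join_cons_ne _ _ _ (by simp), pv_join_cons_ne _ _ _ (by
        intro h; simpa using congrArg List.length h)]
  have h := pv_join_tail count.toNat
  simp only [List.append_assoc] at h ⊢
  rw [show (".ORG 0x10100\n\nstart:\n    MV A, 0x21".toList : List Char)
        = ".ORG 0x10100".toList ++ '\n' :: ("".toList ++ '\n' :: ("start:".toList ++ '\n' :: "    MV A, 0x21".toList)) from by decide]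
  simp only [List.cons_append, List.append_assoc, List.nil_append] at h ⊢
  rw [← h]

-- ===== VERDICT (by name: the statement is the Claim_ definition above) =====
theorem build_asm_pushu_a_nop_popu_imr_21_chain_spec : Claim_equal_build_asm_pushu_a_nop_popu_imr_21_chain := by
  intro count _
  exact pv_equiv count
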